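-- pv_equiv track=rewrite | github.com/nishantchauhan00/GeeksForGeeks | Companies Question/124 K-Palindrome.py | is_k_palin1
-- ===== SOURCE A (Python) =====
-- def is_k_palin1(inp, k):
--     def isPalindrome(s):
--         l, r = 0, len(s) - 1
--         while l < r:
--             if s[l] != s[r]:
--                 return False
--             l += 1
--             r -= 1
--         return True
--
--     def helper(curr, k_curr, i, n):
--         if isPalindrome(curr):
--             return True
--         if k_curr == k or i == n:
--             return False
--
--         considered = helper(curr, k_curr, i + 1, n)
--         not_considered = helper(curr[:i] + curr[i + 1 :], k_curr + 1, i + 1, n)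
--         return considered or not_considered
--
--     return 1 if helper(inp, 0, 0, len(inp)) else 0
-- ===== SOURCE B (Python) =====
-- def is_k_palin1(inp, k):
--     # Level-by-level worklist over the same search states (string, deletions-used),
--     # merging duplicate states, instead of A's naive binary recursion.
--     n = len(inp)
--     frontier = [(inp, 0)]
--     for i in range(n):
--         if any(c == c[::-1] for (c, d) in frontier):
--             return 1
--         nxt = []
--         seen = set()
--         for (c, d) in frontier:
--             if d == k:
--                 continue
--             for st in ((c, d), (c[:i] + c[i + 1:], d + 1)):
--                 if st not in seen:
--                     seen.add(st)
--                     nxt.append(st)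
--         frontier = nxt
--     return 1 if any(c == c[::-1] for (c, d) in frontier) else 0
-- ===== Notes on version B (the rewrite author's own statement) =====
-- stated objective: alternative
-- what changed: A's binary recursion (keep/delete char i, checking each intermediate string for palindromicity) is replaced by an iterative level-by-level worklist over the same (string, deletions-used) states with duplicate states merged; note A is not the usual k-palindrome min-deletion test (its index bookkeeping never deletes two adjacent characters), so the hinted LPS DP would not match and B reproduces A's exact search semantics.
import Mathlib
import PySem

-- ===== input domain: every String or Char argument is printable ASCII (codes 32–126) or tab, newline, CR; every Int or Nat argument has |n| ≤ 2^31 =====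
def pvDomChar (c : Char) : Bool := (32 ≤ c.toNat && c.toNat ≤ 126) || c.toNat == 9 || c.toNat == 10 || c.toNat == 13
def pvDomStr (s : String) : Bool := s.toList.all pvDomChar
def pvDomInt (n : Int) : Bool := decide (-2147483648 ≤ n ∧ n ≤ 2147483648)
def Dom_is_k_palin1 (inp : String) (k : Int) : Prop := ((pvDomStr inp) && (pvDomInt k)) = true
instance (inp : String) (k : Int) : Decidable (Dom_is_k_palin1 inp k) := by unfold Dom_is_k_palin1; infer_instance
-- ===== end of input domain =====

-- B replaces A's naive binary recursion (keep/delete the i-th character) by an iterative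
-- level-by-level worklist over the same (string, deletions-used) states with duplicate
-- states merged; same results on every input, similar cost (objective: alternative).

-- ===== PORT A =====

-- curr[:i] + curr[i+1:]  (the same expression occurs in both Python sources)
def pvDelAt (i : Nat) (c : List Char) : List Char :=
  PySem.List.slice c none (some (i : Int)) ++ PySem.List.slice c (some ((i : Int) + 1)) none

-- the 'while l < r' loop of isPalindrome
def pvPalLoop (s : List Char) (l r : Int) : Bool :=
  if l < r then
    if PySem.List.pyGet? s l ≠ PySem.List.pyGet? s r then false
    else pvPalLoop s (l + 1) (r - 1)
  else true
termination_by (r - l).toNat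
decreasing_by omega

def pvIsPal (s : List Char) : Bool := pvPalLoop s 0 ((s.length : Int) - 1)

-- helper(curr, k_curr, i, n); 'n ≤ i' is Python's 'i == n' (i never exceeds n; ≤ keeps the
-- recursion visibly terminating)
def pvHelper (k : Int) (n : Nat) (curr : List Char) (kc : Int) (i : Nat) : Bool :=
  if pvIsPal curr then true
  else if kc == k || n ≤ i then false
  else
    let considered := pvHelper k n curr kc (i + 1)
    let not_considered := pvHelper k n (pvDelAt i curr) (kc + 1) (i + 1)
    considered || not_considered
termination_by n - i
decreasing_by all_goals { rename_i hg; simp only [Bool.or_eq_true, beq_iff_eq, decide_eq_true_eq, not_or] at hg; omega }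

def is_k_palin1 (inp : String) (k : Int) : Int :=
  if pvHelper k inp.toList.length inp.toList 0 0 then 1 else 0

-- ===== PORT B =====

-- c == c[::-1]  (PySem.List.slice?_none_none_neg_one: s[::-1] is List.reverse)
def pvPalB (c : List Char) : Bool := c == c.reverse

def pvAnyPal (fr : List (List Char × Int)) : Bool := fr.any (fun st => pvPalB st.1)

-- 'if st not in seen: seen.add(st); nxt.append(st)' — seen is exactly the element set of
-- nxt, so the pair is PySem.Set.add on nxt
def pvStep (k : Int) (i : Nat) (fr : List (List Char × Int)) : List (List Char × Int) :=
  fr.foldl (fun nxt st =>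
    if st.2 == k then nxt
    else PySem.Set.add (PySem.Set.add nxt (st.1, st.2)) (pvDelAt i st.1, st.2 + 1)) []

def pvLoop (k : Int) (n i : Nat) (fr : List (List Char × Int)) : Bool :=
  if i < n then
    if pvAnyPal fr then true
    else pvLoop k n (i + 1) (pvStep k i fr)
  else pvAnyPal fr
termination_by n - i
decreasing_by omega

def is_k_palin1_alt (inp : String) (k : Int) : Int :=
  if pvLoop k inp.toList.length 0 [(inp.toList, 0)] then 1 else 0

-- ===== PRECONDITION & SPEC =====
def Spec_is_k_palin1 (inp : String) (k : Int) (out : Int) : Prop := out = is_k_palin1_alt inp k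
instance (inp : String) (k : Int) (out : Int) : Decidable (Spec_is_k_palin1 inp k out) := by unfold Spec_is_k_palin1; infer_instance

-- ===== CLAIM (what is proved, stated in full; the proofs are below) =====
def Claim_equal_is_k_palin1 : Prop := ∀ (inp : String) (k : Int), Dom_is_k_palin1 inp k → Spec_is_k_palin1 inp k (is_k_palin1 inp k)

-- ===== LEMMAS AND PROOFS =====

-- the two-pointer loop checks all pairs (i, l+r-i)
theorem pvPalLoop_iff (s : List Char) (l r : Int) :
    pvPalLoop s l r = true ↔
      (∀ i : Int, l ≤ i → i < l + r - i →
        PySem.List.pyGet? s i = PySem.List.pyGet? s (l + r - i)) := by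
  fun_induction pvPalLoop s l r with
  | case1 l r hlr hne =>
    constructor
    · intro h; exact absurd h (by simp)
    · intro h
      exact absurd (h l le_rfl (by omega)) (by simpa using hne)
  | case2 l r hlr hne ih =>
    rw [ih]
    push Not at hne
    constructor
    · intro h i hi1 hi2
      rcases eq_or_lt_of_le hi1 with heq | hi1'
      · have hri : l + r - i = r := by omega
        rw [hri, ← heq]; exact hne
      · have := h i (by omega) (by omega)
        have he : l + 1 + (r - 1) - i = l + r - i := by omega
        rwa [he] at this
    · intro h i hi1 hi2
      have he : l + 1 + (r - 1) - i = l + r - i := by omega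
      rw [he]
      exact h i (by omega) (by omega)
  | case3 l r hlr =>
    constructor
    · intro _ i hi1 hi2; omega
    · intro _; trivial

theorem getElem?_symm_of_half (s : List Char)
    (h : ∀ i : Int, 0 ≤ i → i < 0 + ((s.length : Int) - 1) - i →
        PySem.List.pyGet? s i = PySem.List.pyGet? s (0 + ((s.length : Int) - 1) - i))
    (j : Nat) (hj : j < s.length) : s[j]? = s[s.length - 1 - j]? := by
  have key : ∀ a : Nat, a < s.length - 1 - a → s[a]? = s[s.length - 1 - a]? := by
    intro a ha
    have h1 : (0 : Int) + ((s.length : Int) - 1) - (a : Int) = ((s.length - 1 - a : Nat) : Int) := by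
      omega
    have := h (a : Int) (by positivity) (by omega)
    rw [h1] at this
    simpa only [PySem.List.pyGet?_natCast] using this
  rcases lt_trichotomy j (s.length - 1 - j) with hlt | heq | hgt
  · exact key j hlt
  · rw [← heq]
  · have hj' : s.length - 1 - j < s.length - 1 - (s.length - 1 - j) := by omega
    have := key (s.length - 1 - j) hj'
    have he : s.length - 1 - (s.length - 1 - j) = j := by omega
    rw [he] at this
    exact this.symm

-- pvIsPal is palindromicity
theorem pvIsPal_eq (s : List Char) : pvIsPal s = pvPalB s := by
  have : pvIsPal s = true ↔ pvPalB s = true := by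
    rw [pvIsPal, pvPalB, beq_iff_eq, pvPalLoop_iff]
    constructor
    · intro h
      apply List.ext_getElem?
      intro j
      by_cases hj : j < s.length
      · rw [List.getElem?_reverse hj]
        exact getElem?_symm_of_half s h j hj
      · rw [List.getElem?_eq_none (by omega), List.getElem?_eq_none (by simp; omega)]
    · intro hrev i hi1 hi2
      have hi3 : i < (s.length : Int) := by omega
      have hj : i.toNat < s.length := by omega
      have hcast : i = ((i.toNat : Nat) : Int) := by omega
      have h2 : 0 + ((s.length : Int) - 1) - i = ((s.length - 1 - i.toNat : Nat) : Int) := by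
        omega
      rw [h2]
      have e1 : PySem.List.pyGet? s i = s[i.toNat]? := by
        conv_lhs => rw [hcast]
        rw [PySem.List.pyGet?_natCast]
      rw [e1, PySem.List.pyGet?_natCast]
      have := congrArg (fun t => t[i.toNat]?) hrev
      simp only at this
      rw [List.getElem?_reverse hj] at this
      exact this
  cases hb : pvPalB s
  · cases hi : pvIsPal s
    · rfl
    · exact absurd (this.mp hi) (by simp [hb])
  · exact this.mpr hb

-- undeduped expansion of one level
def pvExpand (k : Int) (i : Nat) (fr : List (List Char × Int)) : List (List Char × Int) :=
  fr.flatMap (fun st => if st.2 == k then [] else [(st.1, st.2), (pvDelAt i st.1, st.2 + 1)])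

theorem mem_pvStep (k : Int) (i : Nat) (fr : List (List Char × Int)) (x : List Char × Int) :
    x ∈ pvStep k i fr ↔ x ∈ pvExpand k i fr := by
  have main : ∀ (l : List (List Char × Int)) (acc : List (List Char × Int)),
      x ∈ l.foldl (fun nxt st =>
        if st.2 == k then nxt
        else PySem.Set.add (PySem.Set.add nxt (st.1, st.2)) (pvDelAt i st.1, st.2 + 1)) acc ↔
      x ∈ acc ∨ x ∈ pvExpand k i l := by
    intro l
    induction l with
    | nil => intro acc; simp [pvExpand]
    | cons hd tl ih =>
      intro acc
      simp only [List.foldl_cons, ih, pvExpand, List.flatMap_cons, List.mem_append]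
      split
      · simp
      · simp only [PySem.Set.mem_add, List.mem_cons]
        tauto
  rw [pvStep, main]
  simp

theorem pvAnyPal_congr (a b : List (List Char × Int)) (h : ∀ x, x ∈ a ↔ x ∈ b) :
    pvAnyPal a = pvAnyPal b := by
  have hiff : pvAnyPal a = true ↔ pvAnyPal b = true := by
    simp only [pvAnyPal, List.any_eq_true]
    constructor
    · rintro ⟨x, hx, hp⟩; exact ⟨x, (h x).mp hx, hp⟩
    · rintro ⟨x, hx, hp⟩; exact ⟨x, (h x).mpr hx, hp⟩
  cases ha : pvAnyPal a <;> cases hb : pvAnyPal b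
  · rfl
  · exact absurd (hiff.mpr hb) (by simp [ha])
  · exact absurd (hiff.mp ha) (by simp [hb])
  · rfl

theorem helper_stop (k : Int) (n i : Nat) (h : n ≤ i) (st : List Char × Int) :
    pvHelper k n st.1 st.2 i = pvPalB st.1 := by
  rw [pvHelper, pvIsPal_eq]
  cases hp : pvPalB st.1
  · simp [h]
  · simp

theorem helper_step (k : Int) (n i : Nat) (h : i < n) (st : List Char × Int)
    (hp : pvPalB st.1 = false) :
    pvHelper k n st.1 st.2 i =
      ((if st.2 == k then ([] : List (List Char × Int))
        else [(st.1, st.2), (pvDelAt i st.1, st.2 + 1)]).any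
        (fun st' => pvHelper k n st'.1 st'.2 (i + 1))) := by
  rw [pvHelper, pvIsPal_eq, hp]
  cases hk : st.2 == k
  · simp [Nat.not_le.mpr h]
  · simp

theorem mem_pvExpand_congr (k : Int) (i : Nat) (fr1 fr2 : List (List Char × Int))
    (h : ∀ x, x ∈ fr1 ↔ x ∈ fr2) (x : List Char × Int) :
    x ∈ pvExpand k i fr1 ↔ x ∈ pvExpand k i fr2 := by
  simp only [pvExpand, List.mem_flatMap]
  constructor
  · rintro ⟨st, hst, hx⟩; exact ⟨st, (h st).mp hst, hx⟩
  · rintro ⟨st, hst, hx⟩; exact ⟨st, (h st).mpr hst, hx⟩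

-- the frontier 'any' of A's recursion is B's loop on the deduped frontier
theorem any_helper_eq (k : Int) (n : Nat) :
    ∀ (j i : Nat), n - i ≤ j → ∀ (fr1 fr2 : List (List Char × Int)), (∀ x, x ∈ fr1 ↔ x ∈ fr2) →
      fr2.any (fun st => pvHelper k n st.1 st.2 i) = pvLoop k n i fr1 := by
  intro j
  induction j with
  | zero =>
    intro i hi fr1 fr2 hm
    rw [pvLoop, if_neg (by omega)]
    simp only [helper_stop k n i (by omega)]
    exact pvAnyPal_congr fr2 fr1 (fun x => (hm x).symm)
  | succ j ih =>
    intro i hi fr1 fr2 hm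
    by_cases hin : i < n
    · rw [pvLoop, if_pos hin]
      cases hp : pvAnyPal fr1
      · rw [if_neg (by simp)]
        have hall2 : ∀ st ∈ fr2, pvPalB st.1 = false := by
          intro st hst
          by_contra hcon
          have hpt : pvAnyPal fr1 = true :=
            List.any_eq_true.mpr ⟨st, (hm st).mpr hst, by simpa using hcon⟩
          rw [hp] at hpt; exact absurd hpt (by simp)
        have h1 : fr2.any (fun st => pvHelper k n st.1 st.2 i)
            = (pvExpand k i fr2).any (fun st => pvHelper k n st.1 st.2 (i + 1)) := by
          rw [pvExpand, List.any_flatMap]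
          exact PySem.List.any_congr_mem (fun st hst => helper_step k n i hin st (hall2 st hst))
        rw [h1]
        refine ih (i + 1) (by omega) (pvStep k i fr1) (pvExpand k i fr2) ?_
        intro x
        rw [mem_pvStep]
        exact mem_pvExpand_congr k i fr1 fr2 hm x
      · rw [if_pos rfl]
        obtain ⟨st, hst, hpal⟩ := List.any_eq_true.mp hp
        refine List.any_eq_true.mpr ⟨st, (hm st).mp hst, ?_⟩
        rw [pvHelper, pvIsPal_eq]
        simp [hpal]
    · rw [pvLoop, if_neg hin]
      simp only [helper_stop k n i (by omega)]
      exact pvAnyPal_congr fr2 fr1 (fun x => (hm x).symm)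

-- ===== VERDICT (by name: the statement is the Claim_ definition above) =====
theorem is_k_palin1_spec : Claim_equal_is_k_palin1 := by
  intro inp k _
  unfold Spec_is_k_palin1 is_k_palin1 is_k_palin1_alt
  have h := any_helper_eq k inp.toList.length inp.toList.length 0 (by omega)
      [(inp.toList, 0)] [(inp.toList, 0)] (fun _ => Iff.rfl)
  simp only [List.any_cons, List.any_nil, Bool.or_false] at h
  rw [h]
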